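/- GENERATED by mk_final_copies.py from the proof of the farm's unit `start_decoder.C11d` (farm:start_decoder.C11d.1: Lemmas.lean) as the
   re-elaboration sweep compiled it — do not edit. -/
import Asan.CheckWalk
import Vorbis.Spec.Reader
import Vorbis.Spec.StartDecoderC4
import Vorbis.Spec.Units.start_decoder_C11d

open X86 X86.User Asan Vorbis Vorbis.Spec Vorbis.Spec.StartDecoder

set_option maxRecDepth 4000
set_option maxHeartbeats 4000000

namespace Vorbis.Spec.start_decoder_C11d

/-- A window segment C11d may write: the stack below the steady `R` (the pushed return addresses, the frames of the check
routines and of `error`), the field `lookup_values` `[c + 28, c + 32)` of the struct `c = cb(i)`, and `error`'s word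
`[f + 140, f + 144)` of `*f`. -/
def Win11d (g : Ghost) (c : Nat) (w : Span) : Prop :=
  (g.R - 408 ≤ w.lo ∧ w.hi ≤ g.R) ∨
  (c + 28 ≤ w.lo ∧ w.hi ≤ c + 32) ∨
  (g.f + 136 ≤ w.lo ∧ w.hi ≤ g.f + 144)

/-- **The carry of C11d**: over a stretch that writes only `Win11d` windows, `C11.core11` (with `Bits` derived by `bits_kept`: no
window touches a reader's field) and the two byte fields `lookup_type`, `value_bits` of the struct, which no window contains. -/
theorem carry11d {u₀ : State} {g : Ghost} {i : Nat} {A2 A3 Ai : Arena} {A : Arena × List Obj} {pc pc' : Word} {v w : State}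
    {ws : List Span} (hat : In11P u₀ g i A2 A3 Ai A pc v)
    (hs : Mem.SameExcept ws v.mem w.mem) (hun : ShadowUntouched v.mem w.mem)
    (hq : ∀ x, x ∈ ws → Win11d g (g.cb v.mem i) x)
    (hrip : w.rip = pc') (hrsp : w.reg .rsp = v.reg .rsp) (hcode : CodeOK u₀ w.mem) (hinv : abiInv w)
    (hr14 : w.reg .r14 = v.reg .r14) :
    Frame u₀ g pc' A w ∧ Cur g i A2 A3 Ai A w ∧ g.cb w.mem i = g.cb v.mem i ∧
      K15 (Since Ai A.1) w.mem (g.cb v.mem i) ∧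
      Codebook.dimensions w.mem (g.cb v.mem i) = Codebook.dimensions v.mem (g.cb v.mem i) ∧
      Codebook.entries w.mem (g.cb v.mem i) = Codebook.entries v.mem (g.cb v.mem i) ∧
      Codebook.multiplicands w.mem (g.cb v.mem i) = Codebook.multiplicands v.mem (g.cb v.mem i) ∧
      Codebook.lookup_type w.mem (g.cb v.mem i) = Codebook.lookup_type v.mem (g.cb v.mem i) ∧
      Codebook.value_bits w.mem (g.cb v.mem i) = Codebook.value_bits v.mem (g.cb v.mem i) := by
  have hpos : Pos g A := Pos.of hat.frame hat.cur
  have hm0 : MInv g i A2 A3 Ai A v.mem := MInv.of hat.frame hat.cur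
  have hcw := hm0.c_where
  have p1 := hpos.r_eq
  have p2 := hpos.ra_lo
  have p3 := hpos.ra_hi
  have p5 := hpos.f_hi
  have p7 := hpos.objOut
  -- `Bits f`: none of the windows is a field of the reader
  have hb : Bits (g.Blk A) g.len w.mem g.f := by
    apply bits_kept hpos hat.cur.sd.bits hs
    intro x hx
    have k := hq x hx
    unfold Win11d at k
    omega
  have hq11 : ∀ x, x ∈ ws → C11.QuietWin11 g (g.cb v.mem i) x := by
    intro x hx
    have k := hq x hx
    unfold Win11d at k
    unfold C11.QuietWin11
    omega
  obtain ⟨hF, hC, hcb, hk15, e_dim, e_ent, e_mu⟩ :=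
    C11.core11 hat.frame hat.cur hat.k hs hun hq11 hb hrip hrsp hcode hinv hr14
  -- the bytes `[c + 24, c + 26)`: `value_bits`, `lookup_type`
  have hbytes : Mem.EqOn (g.cb v.mem i + 24) (g.cb v.mem i + 26) v.mem w.mem := by
    apply hs.eqOn
    intro x hx
    have k := hq x hx
    unfold Win11d at k
    omega
  have e_lt : Codebook.lookup_type w.mem (g.cb v.mem i) = Codebook.lookup_type v.mem (g.cb v.mem i) := by
    simp only [vacc, voff]
    exact hbytes.u8 _ (by omega) (by omega) (by omega)
  have e_vb : Codebook.value_bits w.mem (g.cb v.mem i) = Codebook.value_bits v.mem (g.cb v.mem i) := by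
    simp only [vacc, voff]
    exact hbytes.u8 _ (by omega) (by omega) (by omega)
  exact ⟨hF, hC, hcb, hk15, e_dim, e_ent, e_mu, e_lt, e_vb⟩

/-- **The error exit of C11d** (0x113b22 after `error(f, 20)` returned 0): `Frame` at the epilogue and `Failed` from CUR(i) in the
new memory (`Cur.failed`). -/
theorem err_exit11d {u₀ : State} {g : Ghost} {i : Nat} {A2 A3 Ai : Arena} {A : Arena × List Obj} {pc : Word} {v w : State}
    {ws : List Span} (hat : In11P u₀ g i A2 A3 Ai A pc v)
    (hs : Mem.SameExcept ws v.mem w.mem) (hun : ShadowUntouched v.mem w.mem)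
    (hq : ∀ x, x ∈ ws → Win11d g (g.cb v.mem i) x)
    (hrip : w.rip = pc_ERR) (hrsp : w.reg .rsp = v.reg .rsp) (hcode : CodeOK u₀ w.mem) (hinv : abiInv w)
    (hr14 : w.reg .r14 = v.reg .r14) (hrax : w.reg .rax = 0) : AtERR u₀ g w := by
  obtain ⟨hF, hC, _, _, _, _, _, _, _⟩ := carry11d hat hs hun hq hrip hrsp hcode hinv hr14
  refine ⟨A, ?_⟩
  exact
    { frame := hF
      hand := hat.cur.hand
      result := Or.inl ⟨by rw [hrax]; rfl, hC.failed⟩ }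

/-- **The exit of C11d to the join 0x114c6f**: `lookup_values` is stored (`LV`), with FIX 17 `LV ≤ entries` (the two tests), hence
`LV ≤ E ≤ E · D ≤ 1FFFFFFFH < 2^30` (`1 ≤ D`). -/
theorem join_exit11d {u₀ : State} {g : Ghost} {i : Nat} {A2 A3 Ai : Arena} {A : Arena × List Obj} {pc : Word} {v w : State}
    {ws : List Span} (hat : In11P u₀ g i A2 A3 Ai A pc v)
    (hvb : 1 ≤ Codebook.value_bits v.mem (g.cb v.mem i) ∧ Codebook.value_bits v.mem (g.cb v.mem i) ≤ 16)
    (hlt1 : Codebook.lookup_type v.mem (g.cb v.mem i) = 1)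
    (hs : Mem.SameExcept ws v.mem w.mem) (hun : ShadowUntouched v.mem w.mem)
    (hq : ∀ x, x ∈ ws → Win11d g (g.cb v.mem i) x)
    (hrip : w.rip = Vorbis.L.start_decoder.at_114c6f) (hrsp : w.reg .rsp = v.reg .rsp) (hcode : CodeOK u₀ w.mem)
    (hinv : abiInv w) (hr14 : w.reg .r14 = v.reg .r14)
    (hlv : (Codebook.lookup_values w.mem (g.cb v.mem i) : Int) ≤ Codebook.entries v.mem (g.cb v.mem i)) :
    At11V u₀ g i w := by
  obtain ⟨hF, hC, hcb, hk15, e_dim, e_ent, e_mu, e_lt, e_vb⟩ := carry11d hat hs hun hq hrip hrsp hcode hinv hr14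
  have hD := hat.k.k1.dim_pos
  have hE := hat.k.k1.ent_nonneg
  have hP := hat.prod_le
  refine ⟨A, A2, A3, Ai, ?_⟩
  exact
    { frame := hF
      cur := hC
      k := by rw [hcb]; exact hk15
      type_12 := by rw [hcb, e_lt]; exact hat.type_12
      prod_le := by rw [hcb, e_ent, e_dim]; exact hat.prod_le
      noTemps := hat.noTemps
      mu0 := by rw [hcb, e_mu]; exact hat.mu0
      vb := by rw [hcb, e_vb]; exact hvb
      type1_lv := by
        intro _
        rw [hcb, e_ent]
        exact hlv
      type2_lv := by
        intro h2
        rw [hcb, e_lt, hlt1] at h2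
        exact absurd h2 (by decide)
      lv_lt := by
        rw [hcb]
        have hmul : Codebook.entries v.mem (g.cb v.mem i) ≤
            Codebook.entries v.mem (g.cb v.mem i) * Codebook.dimensions v.mem (g.cb v.mem i) := by
          have h1 := Int.mul_le_mul_of_nonneg_left hD hE
          rw [Int.mul_one] at h1
          exact h1
        omega }

/-- **The footprint of the error stub over the cut point's memory**: the pushed return address of `call error` (below the steady
`R`) and `error`'s footprint (its frame below that, the word `f->error`) as one footprint with windows in `g.R` / `g.f` form. -/
theorem err_glue11d {g : Ghost} {m mr : Mem} {x : Nat} (hr : g.R + 1480 = (g.e.reg .rsp).toNat)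
    (hra : 0x700000 + 1888 ≤ (g.e.reg .rsp).toNat)
    (t1 : (g.e.reg .rsp - 1488).toNat = (g.e.reg .rsp).toNat - 1488)
    (hsame : Mem.SameExcept [⟨(g.e.reg .rsp).toNat - 1488 - 48, (g.e.reg .rsp).toNat - 1488⟩, ⟨g.f + 140, g.f + 140 + 4⟩]
      (m.writeLE (g.e.reg .rsp - 1488) 8 x) mr) :
    Mem.SameExcept [⟨g.R - 408, g.R⟩, ⟨g.f + 140, g.f + 144⟩] m mr := by
  have hlt := (g.e.reg .rsp).toNat_lt
  have hpush : Mem.SameExcept [⟨g.R - 408, g.R⟩] m (m.writeLE (g.e.reg .rsp - 1488) 8 x) := by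
    refine Mem.SameExcept.writeLE _ m _ 8 _ ?_ ⟨⟨g.R - 408, g.R⟩, List.mem_cons_self, ?_, ?_⟩
    · rw [t1]
      omega
    · rw [t1]
      show g.R - 408 ≤ _
      omega
    · rw [t1]
      show _ ≤ g.R
      omega
  refine Mem.SameExcept.trans (ν := m.writeLE (g.e.reg .rsp - 1488) 8 x) ?_ ?_
  · apply hpush.mono
    intro w hw a h1 h2
    rw [List.mem_singleton.mp hw] at h1 h2
    exact ⟨_, List.mem_cons_self, h1, h2⟩
  · apply hsame.mono
    intro w hw a h1 h2
    simp only [List.mem_cons, List.mem_nil_iff, or_false] at hw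
    rcases hw with rfl | rfl
    · simp only [] at h1 h2
      exact ⟨_, List.mem_cons_self, by simp only []; omega, by simp only []; omega⟩
    · simp only [] at h1 h2
      exact ⟨_, List.mem_cons_of_mem _ List.mem_cons_self, by simp only []; omega, by simp only []; omega⟩

/-- The two windows of the error stub are `Win11d` windows. -/
theorem err_wins11d (g : Ghost) (c : Nat) :
    ∀ x, x ∈ [(⟨g.R - 408, g.R⟩ : Span), ⟨g.f + 140, g.f + 144⟩] → Win11d g c x := by
  intro x hx
  simp only [List.mem_cons, List.mem_nil_iff, or_false] at hx
  unfold Win11d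
  rcases hx with rfl | rfl
  · left
    exact ⟨Nat.le_refl _, Nat.le_refl _⟩
  · right; right
    exact ⟨by simp only []; omega, by simp only []; omega⟩

/-- FIX 17 as arithmetic: a 32-bit value with the sign bit clear (`js` not taken) that is not above `e` as a signed number (`jl` not
taken) is, read unsigned, at most `e`. -/
theorem fix17_le (x : BitVec 32) (e : Int) (h1 : x.msb = false) (h2 : ¬ e < x.toInt) :
    ((x.toNat % 2 ^ 32 : Nat) : Int) ≤ e := by
  have hx := x.isLt
  rw [BitVec.toInt_eq_msb_cond, h1] at h2
  rw [Nat.mod_eq_of_lt hx]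
  simp only [Bool.false_eq_true, if_false] at h2
  omega

/-- The two windows of the store path (the pushed return addresses of the check calls, the word `c->lookup_values`) are `Win11d`
windows. -/
theorem store_wins11d (g : Ghost) (c : Nat) :
    ∀ x, x ∈ [(⟨g.R - 408, g.R⟩ : Span), ⟨c + 28, c + 32⟩] → Win11d g c x := by
  intro x hx
  simp only [List.mem_cons, List.mem_nil_iff, or_false] at hx
  unfold Win11d
  rcases hx with rfl | rfl
  · left
    exact ⟨Nat.le_refl _, Nat.le_refl _⟩
  · right; left
    exact ⟨Nat.le_refl _, Nat.le_refl _⟩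

end Vorbis.Spec.start_decoder_C11d
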